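-- pv_equiv track=rewrite | github.com/fpsjjang97-boop/ableton | agents/composer.py | get_voicing_pitch
-- ===== SOURCE A (Python) =====
-- SCALES = {
--     'major':         [0, 2, 4, 5, 7, 9, 11],
--     'minor':         [0, 2, 3, 5, 7, 8, 10],
--     'dorian':        [0, 2, 3, 5, 7, 9, 10],
--     'mixolydian':    [0, 2, 4, 5, 7, 9, 10],
--     'pentatonic':    [0, 2, 4, 7, 9],
--     'minor_penta':   [0, 3, 5, 7, 10],
--     'blues':         [0, 3, 5, 6, 7, 10],
--     'chromatic':     list(range(12)),
-- }
--
-- def get_voicing_pitch(root_idx, scale_name, role, target_range):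
--     """보이싱 역할에 따라 적절한 음역의 피치를 반환."""
--     intervals = SCALES.get(scale_name, SCALES['minor'])
--     lo, hi = target_range
--
--     if role == 'melody' or role == 'third':
--         # 3도 또는 멜로디: 스케일의 3번째 음
--         degree = 2 if role == 'third' else 4
--         target_pc = (root_idx + intervals[degree % len(intervals)]) % 12
--     elif role == 'fifth':
--         target_pc = (root_idx + 7) % 12
--     elif role in ('root', 'bass'):
--         target_pc = root_idx % 12
--     else:
--         target_pc = root_idx % 12
--
--     # 음역 내에서 해당 피치 클래스 찾기
--     center = (lo + hi) // 2
--     candidates = []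
--     for octave_base in range(0, 128, 12):
--         p = octave_base + target_pc
--         if lo <= p <= hi:
--             candidates.append(p)
--
--     if not candidates:
--         return center
--
--     # 중앙에 가장 가까운 음 선택
--     return min(candidates, key=lambda p: abs(p - center))
-- ===== SOURCE B (Python) =====
-- SCALES = {
--     'major':         [0, 2, 4, 5, 7, 9, 11],
--     'minor':         [0, 2, 3, 5, 7, 8, 10],
--     'dorian':        [0, 2, 3, 5, 7, 9, 10],
--     'mixolydian':    [0, 2, 4, 5, 7, 9, 10],
--     'pentatonic':    [0, 2, 4, 7, 9],
--     'minor_penta':   [0, 3, 5, 7, 10],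
--     'blues':         [0, 3, 5, 6, 7, 10],
--     'chromatic':     list(range(12)),
-- }
--
-- def get_voicing_pitch(root_idx, scale_name, role, target_range):
--     """Closed-form octave selection instead of enumerating all candidate octaves."""
--     lo, hi = target_range
--
--     # pitch class offset for the role (scale looked up only when actually needed)
--     if role == 'melody' or role == 'third':
--         intervals = SCALES.get(scale_name, SCALES['minor'])
--         degree = 2 if role == 'third' else 4
--         offset = intervals[degree % len(intervals)]
--     elif role == 'fifth':
--         offset = 7
--     else:
--         offset = 0
--     target_pc = (root_idx + offset) % 12
--
--     center = (lo + hi) // 2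
--     # feasible octave indices k (with pitch target_pc + 12*k), clamped to 0..10
--     k0 = max(0, -((target_pc - lo) // 12))      # ceil((lo - target_pc) / 12)
--     k1 = min(10, (hi - target_pc) // 12)
--     if k0 > k1:
--         return center
--     # octave index nearest to center, ties toward the lower pitch, clamped into [k0, k1]
--     k = (center - target_pc + 5) // 12
--     return target_pc + 12 * min(k1, max(k0, k))
-- ===== Notes on version B (the rewrite author's own statement) =====
-- stated objective: alternative
-- what changed: B replaces A's enumerate-all-octaves-then-min strategy (build the list of in-range candidates over range(0,128,12), then min by distance to center) with a closed-form computation: it derives the feasible octave-index window [k0,k1] by floor/ceil division and clamps the tie-aware nearest octave index into it, with no candidate list and no min scan.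
import Mathlib
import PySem

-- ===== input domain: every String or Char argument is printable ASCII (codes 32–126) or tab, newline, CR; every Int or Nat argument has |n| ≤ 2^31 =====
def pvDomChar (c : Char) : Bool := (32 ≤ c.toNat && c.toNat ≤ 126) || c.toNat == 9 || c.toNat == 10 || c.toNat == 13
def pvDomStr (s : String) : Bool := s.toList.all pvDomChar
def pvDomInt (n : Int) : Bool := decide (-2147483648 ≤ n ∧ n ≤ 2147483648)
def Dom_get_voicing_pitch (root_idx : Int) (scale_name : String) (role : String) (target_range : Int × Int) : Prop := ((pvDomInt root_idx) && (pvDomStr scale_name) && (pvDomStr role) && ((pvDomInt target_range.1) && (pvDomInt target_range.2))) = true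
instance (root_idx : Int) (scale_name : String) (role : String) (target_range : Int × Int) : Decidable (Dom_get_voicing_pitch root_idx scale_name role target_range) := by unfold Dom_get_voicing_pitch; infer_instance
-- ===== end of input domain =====

-- B replaces A's build-all-candidates-then-min strategy with a closed-form octave-index
-- computation (clamp the tie-aware nearest octave index into the feasible window).
-- A is total on its domain, so there is no Pre_.

-- shared module constant: the SCALES dict of the Python module
def pvSCALES : PySem.Dict String (List Int) := PySem.Dict.ofList
  [("major", [0, 2, 4, 5, 7, 9, 11]),
   ("minor", [0, 2, 3, 5, 7, 8, 10]),
   ("dorian", [0, 2, 3, 5, 7, 9, 10]),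
   ("mixolydian", [0, 2, 4, 5, 7, 9, 10]),
   ("pentatonic", [0, 2, 4, 7, 9]),
   ("minor_penta", [0, 3, 5, 7, 10]),
   ("blues", [0, 3, 5, 6, 7, 10]),
   ("chromatic", [0, 1, 2, 3, 4, 5, 6, 7, 8, 9, 10, 11])]

-- ===== PORT A =====
def get_voicing_pitch (root_idx : Int) (scale_name : String) (role : String) (target_range : Int × Int) : Int :=
  let intervals : List Int := pvSCALES.getD scale_name [0, 2, 3, 5, 7, 8, 10]
  let lo := target_range.1
  let hi := target_range.2
  let target_pc : Int :=
    if role == "melody" || role == "third" then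
      let degree : Int := if role == "third" then 2 else 4
      PySem.Int.mod (root_idx + PySem.List.pyGetD intervals (PySem.Int.mod degree (intervals.length : Int)) 0) 12
    else if role == "fifth" then
      PySem.Int.mod (root_idx + 7) 12
    else if role == "root" || role == "bass" then
      PySem.Int.mod root_idx 12
    else
      PySem.Int.mod root_idx 12
  let center := PySem.Int.floordiv (lo + hi) 2
  let candidates : List Int := (PySem.List.pyRange 0 128 12).foldl
    (fun acc octave_base =>
      let p := octave_base + target_pc
      if lo ≤ p ∧ p ≤ hi then acc ++ [p] else acc) []
  if candidates.isEmpty then center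
  else (PySem.List.min? candidates (fun p => |p - center|)).getD center

-- ===== PORT B =====
def get_voicing_pitch_alt (root_idx : Int) (scale_name : String) (role : String) (target_range : Int × Int) : Int :=
  let lo := target_range.1
  let hi := target_range.2
  let offset : Int :=
    if role == "melody" || role == "third" then
      let intervals : List Int := pvSCALES.getD scale_name [0, 2, 3, 5, 7, 8, 10]
      let degree : Int := if role == "third" then 2 else 4
      PySem.List.pyGetD intervals (PySem.Int.mod degree (intervals.length : Int)) 0
    else if role == "fifth" then 7
    else 0
  let target_pc : Int := PySem.Int.mod (root_idx + offset) 12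
  let center := PySem.Int.floordiv (lo + hi) 2
  let k0 := max 0 (-(PySem.Int.floordiv (target_pc - lo) 12))
  let k1 := min 10 (PySem.Int.floordiv (hi - target_pc) 12)
  if k0 > k1 then center
  else
    let k := PySem.Int.floordiv (center - target_pc + 5) 12
    target_pc + 12 * min k1 (max k0 k)

-- ===== PRECONDITION & SPEC =====
def Spec_get_voicing_pitch (root_idx : Int) (scale_name : String) (role : String) (target_range : Int × Int) (out : Int) : Prop := out = get_voicing_pitch_alt root_idx scale_name role target_range
instance (root_idx : Int) (scale_name : String) (role : String) (target_range : Int × Int) (out : Int) : Decidable (Spec_get_voicing_pitch root_idx scale_name role target_range out) := by unfold Spec_get_voicing_pitch; infer_instance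

-- ===== CLAIM (what is proved, stated in full; the proofs are below) =====
def Claim_equal_get_voicing_pitch : Prop := ∀ (root_idx : Int) (scale_name : String) (role : String) (target_range : Int × Int), Dom_get_voicing_pitch root_idx scale_name role target_range → Spec_get_voicing_pitch root_idx scale_name role target_range (get_voicing_pitch root_idx scale_name role target_range)

-- ===== LEMMAS AND PROOFS =====

-- a range filtered by an interval condition is a range
lemma pv_filter_pyRange_interval (A B : Int) : ∀ (n : Nat) (a b : Int), b - a = n →
    (PySem.List.pyRange a b 1).filter (fun k => decide (A ≤ k ∧ k < B))
      = PySem.List.pyRange (max a A) (min b B) 1 := by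
  intro n
  induction n with
  | zero =>
    intro a b hn
    rw [PySem.List.pyRange_one_eq_nil (by omega), PySem.List.pyRange_one_eq_nil (by omega)]
    rfl
  | succ n ih =>
    intro a b hn
    have hsplit : PySem.List.pyRange a b 1 = PySem.List.pyRange a (b - 1) 1 ++ [b - 1] := by
      have := PySem.List.pyRange_one_succ_right (a := a) (b := b - 1) (by omega)
      rwa [show b - 1 + 1 = b by omega] at this
    rw [hsplit, List.filter_append, ih a (b - 1) (by omega)]
    by_cases hc : A ≤ b - 1 ∧ b - 1 < B
    · have h1 : min b B = b := by omega
      have h2 : min (b - 1) B = b - 1 := by omega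
      rw [h1, h2]
      have := PySem.List.pyRange_one_succ_right (a := max a A) (b := b - 1) (by omega)
      rw [show b - 1 + 1 = b by omega] at this
      rw [this]
      simp [hc.1, hc.2]
    · have hfalse : (fun k => decide (A ≤ k ∧ k < B)) (b - 1) = false := by
        simp only [decide_eq_false_iff_not]; exact hc
      simp only [List.filter, hfalse, List.append_nil]
      by_cases hB : B ≤ b - 1
      · rw [show min b B = min (b - 1) B by omega]
      · -- then A > b - 1, both ranges empty
        rw [PySem.List.pyRange_one_eq_nil (by omega), PySem.List.pyRange_one_eq_nil (by omega)]

-- min? over a snoc is one fold step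
lemma pv_min?_snoc {α κ : Type} [LT κ] [DecidableLT κ] (xs : List α) (x : α) (key : α → κ) :
    PySem.List.min? (xs ++ [x]) key
      = match PySem.List.min? xs key with
        | none => some x
        | some m => if key x < key m then some x else some m := by
  simp only [PySem.List.min?, List.foldl_append, List.foldl_cons, List.foldl_nil]
  rfl

-- stable min of an arithmetic progression by distance to c: the clamped nearest index
lemma pv_minprog (t c : Int) : ∀ (n : Nat) (a b : Int), a < b → b - a = n →
    PySem.List.min? ((PySem.List.pyRange a b 1).map (fun k => 12 * k + t)) (fun p => |p - c|)
      = some (12 * min (b - 1) (max a (PySem.Int.floordiv (c - t + 5) 12)) + t) := by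
  have hq : PySem.Int.floordiv (c - t + 5) 12 = (c - t + 5) / 12 :=
    PySem.Int.floordiv_eq_ediv_of_pos (by norm_num)
  intro n
  induction n with
  | zero => intro a b hab hn; omega
  | succ n ih =>
    intro a b hab hn
    by_cases hb : b = a + 1
    · subst hb
      rw [PySem.List.pyRange_one_singleton]
      simp only [List.map_cons, List.map_nil]
      have : PySem.List.min? [12 * a + t] (fun p => |p - c|) = some (12 * a + t) := by
        simp [PySem.List.min?]
      rw [this, hq]
      congr 1
      omega
    · have hsplit : PySem.List.pyRange a b 1 = PySem.List.pyRange a (b - 1) 1 ++ [b - 1] := by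
        have := PySem.List.pyRange_one_succ_right (a := a) (b := b - 1) (by omega)
        rwa [show b - 1 + 1 = b by omega] at this
      rw [hsplit, List.map_append, List.map_singleton, pv_min?_snoc,
        ih a (b - 1) (by omega) (by omega), hq]
      dsimp only
      split_ifs with habs
      · simp only [Int.abs_eq_natAbs] at habs
        congr 1
        omega
      · simp only [not_lt, Int.abs_eq_natAbs] at habs
        congr 1
        omega

-- A's octave-selection loop and B's closed form, abstracted over the pitch class
def pvCoreA (t lo hi : Int) : Int :=
  let center := PySem.Int.floordiv (lo + hi) 2
  let candidates : List Int := (PySem.List.pyRange 0 128 12).foldl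
    (fun acc octave_base =>
      let p := octave_base + t
      if lo ≤ p ∧ p ≤ hi then acc ++ [p] else acc) []
  if candidates.isEmpty then center
  else (PySem.List.min? candidates (fun p => |p - center|)).getD center

def pvCoreB (t lo hi : Int) : Int :=
  let center := PySem.Int.floordiv (lo + hi) 2
  let k0 := max 0 (-(PySem.Int.floordiv (t - lo) 12))
  let k1 := min 10 (PySem.Int.floordiv (hi - t) 12)
  if k0 > k1 then center
  else
    let k := PySem.Int.floordiv (center - t + 5) 12
    t + 12 * min k1 (max k0 k)

-- A's target-pitch-class branch and B's offset form
def pvTpcA (root_idx : Int) (scale_name role : String) : Int :=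
  if role == "melody" || role == "third" then
    let intervals : List Int := pvSCALES.getD scale_name [0, 2, 3, 5, 7, 8, 10]
    let degree : Int := if role == "third" then 2 else 4
    PySem.Int.mod (root_idx + PySem.List.pyGetD intervals (PySem.Int.mod degree (intervals.length : Int)) 0) 12
  else if role == "fifth" then PySem.Int.mod (root_idx + 7) 12
  else if role == "root" || role == "bass" then PySem.Int.mod root_idx 12
  else PySem.Int.mod root_idx 12

def pvTpcB (root_idx : Int) (scale_name role : String) : Int :=
  PySem.Int.mod (root_idx +
    (if role == "melody" || role == "third" then
      let intervals : List Int := pvSCALES.getD scale_name [0, 2, 3, 5, 7, 8, 10]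
      let degree : Int := if role == "third" then 2 else 4
      PySem.List.pyGetD intervals (PySem.Int.mod degree (intervals.length : Int)) 0
    else if role == "fifth" then 7 else 0)) 12

-- the two octave-selection strategies agree for every pitch class
lemma pv_core (t lo hi : Int) : pvCoreA t lo hi = pvCoreB t lo hi := by
  unfold pvCoreA pvCoreB
  have hc : PySem.Int.floordiv (lo + hi) 2 = (lo + hi) / 2 :=
    PySem.Int.floordiv_eq_ediv_of_pos (by norm_num)
  have hK : PySem.Int.floordiv (t - lo) 12 = (t - lo) / 12 :=
    PySem.Int.floordiv_eq_ediv_of_pos (by norm_num)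
  have hB : PySem.Int.floordiv (hi - t) 12 = (hi - t) / 12 :=
    PySem.Int.floordiv_eq_ediv_of_pos (by norm_num)
  have hq : PySem.Int.floordiv ((lo + hi) / 2 - t + 5) 12 = ((lo + hi) / 2 - t + 5) / 12 :=
    PySem.Int.floordiv_eq_ediv_of_pos (by norm_num)
  dsimp only
  rw [hc, hK, hB, hq]
  have hrange : PySem.List.pyRange 0 128 12 = (PySem.List.pyRange 0 11 1).map (fun k => 12 * k) := by
    decide
  rw [hrange, List.foldl_map,
    PySem.List.foldl_append_ite (p := fun k => lo ≤ 12 * k + t ∧ 12 * k + t ≤ hi)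
      (f := fun k => 12 * k + t),
    List.nil_append]
  rw [List.filter_congr (q := fun k => decide (-((t - lo) / 12) ≤ k ∧ k < (hi - t) / 12 + 1))
    (fun k _ => by
      apply decide_eq_decide.mpr
      omega)]
  rw [pv_filter_pyRange_interval (-((t - lo) / 12)) ((hi - t) / 12 + 1) 11 0 11 (by norm_num)]
  by_cases hempty : min 11 ((hi - t) / 12 + 1) ≤ max 0 (-((t - lo) / 12))
  · rw [PySem.List.pyRange_one_eq_nil hempty]
    simp only [List.map_nil, List.isEmpty_nil, if_true]
    have hcond : max 0 (-((t - lo) / 12)) > min 10 ((hi - t) / 12) := by omega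
    rw [if_pos hcond]
  · push Not at hempty
    rw [pv_minprog t ((lo + hi) / 2)
      (min 11 ((hi - t) / 12 + 1) - max 0 (-((t - lo) / 12))).toNat
      (max 0 (-((t - lo) / 12))) (min 11 ((hi - t) / 12 + 1)) hempty (by omega), hq]
    have hcond : ¬ (max 0 (-((t - lo) / 12)) > min 10 ((hi - t) / 12)) := by omega
    rw [if_neg hcond]
    have hne : ¬ ((List.map (fun k => 12 * k + t)
        (PySem.List.pyRange (max 0 (-((t - lo) / 12))) (min 11 ((hi - t) / 12 + 1)) 1)).isEmpty = true) := by
      simp only [List.isEmpty_iff, List.map_eq_nil_iff]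
      intro hnil
      have hlen := congrArg List.length hnil
      rw [PySem.List.length_pyRange_one] at hlen
      simp only [List.length_nil] at hlen
      omega
    rw [if_neg hne, Option.getD_some]
    omega

-- ===== VERDICT (by name: the statement is the Claim_ definition above) =====
lemma pv_tpc_eq (root_idx : Int) (scale_name role : String) :
    pvTpcA root_idx scale_name role = pvTpcB root_idx scale_name role := by
  unfold pvTpcA pvTpcB
  split_ifs <;> norm_num

theorem get_voicing_pitch_spec : Claim_equal_get_voicing_pitch := by
  intro root_idx scale_name role target_range _hdom
  unfold Spec_get_voicing_pitch
  have hA : get_voicing_pitch root_idx scale_name role target_range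
      = pvCoreA (pvTpcA root_idx scale_name role) target_range.1 target_range.2 := rfl
  have hB : get_voicing_pitch_alt root_idx scale_name role target_range
      = pvCoreB (pvTpcB root_idx scale_name role) target_range.1 target_range.2 := rfl
  rw [hA, hB, pv_tpc_eq]
  exact pv_core _ target_range.1 target_range.2
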